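-- pv_equiv track=rewrite | github.com/MrBrantCode/unitest_baseline | mut_generate/mist_train_cf/cf_75795/solution.py | quadruplets
-- ===== SOURCE A (Python) =====
-- from collections import defaultdict
--
-- def quadruplets(nums):
--     product_map = defaultdict(list)
--     n = len(nums)
--     res = 0
--
--     for i in range(n):
--         for j in range(i+1, n):
--             product = nums[i] * nums[j]
--             for x, y in product_map[product]:
--                 if x != i and x != j and y != i and y != j:
--                     res += 1
--
--             product_map[product].append((i, j))
--
--     return res
-- ===== SOURCE B (Python) =====
-- from collections import defaultdict
--
-- def quadruplets(nums):
--     n = len(nums)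
--     pair_cnt = defaultdict(int)
--     idx_cnt = defaultdict(int)
--     res = 0
--     for i in range(n):
--         for j in range(i + 1, n):
--             p = nums[i] * nums[j]
--             # earlier pairs with product p, minus those sharing index i or j
--             # (an earlier pair can share at most one index with (i, j))
--             res += pair_cnt[p] - idx_cnt[(p, i)] - idx_cnt[(p, j)]
--             pair_cnt[p] += 1
--             idx_cnt[(p, i)] += 1
--             idx_cnt[(p, j)] += 1
--     return res
-- ===== Notes on version B (the rewrite author's own statement) =====
-- stated objective: faster
-- what changed: B drops A's product_map of pair lists and its inner scan over all earlier equal-product pairs, instead keeping two integer counters (pairs per product and pairs per (product, index)) so each index pair contributes in O(1) via an inclusion-exclusion count.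
import Mathlib
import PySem

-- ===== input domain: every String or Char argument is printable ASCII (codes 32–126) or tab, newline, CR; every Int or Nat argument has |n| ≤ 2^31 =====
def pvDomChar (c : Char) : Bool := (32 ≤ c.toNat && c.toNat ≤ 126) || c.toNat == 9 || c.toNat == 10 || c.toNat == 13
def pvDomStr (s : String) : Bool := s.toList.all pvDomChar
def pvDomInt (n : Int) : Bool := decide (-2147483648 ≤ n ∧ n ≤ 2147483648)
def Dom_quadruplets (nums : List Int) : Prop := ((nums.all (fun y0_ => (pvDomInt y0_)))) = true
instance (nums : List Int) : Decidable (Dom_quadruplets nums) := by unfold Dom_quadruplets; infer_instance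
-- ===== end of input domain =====

-- B replaces A's per-pair scan of all earlier equal-product pairs with two counters
-- (pairs per product, pairs per (product, index)), so each pair is processed in O(1)
-- dictionary work instead of a scan; same return value.

-- ===== PORT A =====
-- literal transliteration of A: product_map : product -> list of (i, j) pairs (defaultdict(list));
-- nums[i]/nums[j] is ported as pyGetD with default 0, exact because i, j come from range(n) and are in range.
def quadruplets (nums : List Int) : Int :=
  let n : Int := nums.length
  let st :=
    (PySem.List.pyRange 0 n 1).foldl (fun st i =>
      (PySem.List.pyRange (i + 1) n 1).foldl (fun st j =>
        let product := PySem.List.pyGetD nums i 0 * PySem.List.pyGetD nums j 0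
        let lst := st.1.getD product []
        let res := lst.foldl (fun r q =>
          if q.1 ≠ i ∧ q.1 ≠ j ∧ q.2 ≠ i ∧ q.2 ≠ j then r + 1 else r) st.2
        (st.1.insert product (lst ++ [(i, j)]), res)) st)
      ((PySem.Dict.empty : PySem.Dict Int (List (Int × Int))), (0 : Int))
  st.2

-- ===== PORT B =====
-- literal transliteration of B: pair_cnt / idx_cnt are defaultdict(int) counters.
def quadruplets_alt (nums : List Int) : Int :=
  let n : Int := nums.length
  let st :=
    (PySem.List.pyRange 0 n 1).foldl (fun st i =>
      (PySem.List.pyRange (i + 1) n 1).foldl (fun st j =>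
        let pc := st.1
        let ic := st.2.1
        let p := PySem.List.pyGetD nums i 0 * PySem.List.pyGetD nums j 0
        let res := st.2.2 + pc.getD p 0 - ic.getD (p, i) 0 - ic.getD (p, j) 0
        let pc := pc.insert p (pc.getD p 0 + 1)
        let ic := ic.insert (p, i) (ic.getD (p, i) 0 + 1)
        let ic := ic.insert (p, j) (ic.getD (p, j) 0 + 1)
        (pc, ic, res)) st)
      ((PySem.Dict.empty : PySem.Dict Int Int),
       (PySem.Dict.empty : PySem.Dict (Int × Int) Int), (0 : Int))
  st.2.2

-- ===== PRECONDITION & SPEC =====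
def Spec_quadruplets (nums : List Int) (out : Int) : Prop := out = quadruplets_alt nums
instance (nums : List Int) (out : Int) : Decidable (Spec_quadruplets nums out) := by unfold Spec_quadruplets; infer_instance

-- ===== CLAIM (what is proved, stated in full; the proofs are below) =====
def Claim_equal_quadruplets : Prop := ∀ (nums : List Int), Dom_quadruplets nums → Spec_quadruplets nums (quadruplets nums)

-- ===== LEMMAS AND PROOFS =====

-- the product A and B key their dictionaries by, for the index pair q
def pvProdAt (nums : List Int) (q : Int × Int) : Int :=
  PySem.List.pyGetD nums q.1 0 * PySem.List.pyGetD nums q.2 0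

-- one step of A's inner loop body, as a function of the index pair
def pvStepA (nums : List Int) (st : PySem.Dict Int (List (Int × Int)) × Int)
    (q : Int × Int) : PySem.Dict Int (List (Int × Int)) × Int :=
  let product := PySem.List.pyGetD nums q.1 0 * PySem.List.pyGetD nums q.2 0
  let lst := st.1.getD product []
  let res := lst.foldl (fun r w =>
    if w.1 ≠ q.1 ∧ w.1 ≠ q.2 ∧ w.2 ≠ q.1 ∧ w.2 ≠ q.2 then r + 1 else r) st.2
  (st.1.insert product (lst ++ [(q.1, q.2)]), res)

-- one step of B's inner loop body
def pvStepB (nums : List Int)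
    (st : PySem.Dict Int Int × PySem.Dict (Int × Int) Int × Int)
    (q : Int × Int) : PySem.Dict Int Int × PySem.Dict (Int × Int) Int × Int :=
  let pc := st.1
  let ic := st.2.1
  let p := PySem.List.pyGetD nums q.1 0 * PySem.List.pyGetD nums q.2 0
  let res := st.2.2 + pc.getD p 0 - ic.getD (p, q.1) 0 - ic.getD (p, q.2) 0
  let pc := pc.insert p (pc.getD p 0 + 1)
  let ic := ic.insert (p, q.1) (ic.getD (p, q.1) 0 + 1)
  let ic := ic.insert (p, q.2) (ic.getD (p, q.2) 0 + 1)
  (pc, ic, res)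

-- the sequence of index pairs both programs iterate over
def pvPairs (nums : List Int) : List (Int × Int) :=
  (PySem.List.pyRange 0 (nums.length : Int) 1).flatMap (fun i =>
    (PySem.List.pyRange (i + 1) (nums.length : Int) 1).map (fun j => (i, j)))

-- a nested for-loop is a fold over the flattened pair list
theorem pv_foldl_nested {σ : Type} (l : List Int) (f : Int → List Int)
    (G : σ → Int × Int → σ) (init : σ) :
    l.foldl (fun st i => (f i).foldl (fun st j => G st (i, j)) st) init
      = (l.flatMap (fun i => (f i).map (fun j => (i, j)))).foldl G init := by
  induction l generalizing init with
  | nil => rfl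
  | cons a t ih => simp only [List.flatMap_cons, List.foldl_cons, List.foldl_append,
      List.foldl_map, ih]

theorem pv_quadruplets_eq_fold (nums : List Int) :
    quadruplets nums = ((pvPairs nums).foldl (pvStepA nums)
      ((PySem.Dict.empty : PySem.Dict Int (List (Int × Int))), (0 : Int))).2 := by
  have h : quadruplets nums
      = ((PySem.List.pyRange 0 (nums.length : Int) 1).foldl (fun st i =>
          (PySem.List.pyRange (i + 1) (nums.length : Int) 1).foldl
            (fun st j => pvStepA nums st (i, j)) st)
          ((PySem.Dict.empty : PySem.Dict Int (List (Int × Int))), (0 : Int))).2 := rfl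
  rw [h, pv_foldl_nested (f := fun i => PySem.List.pyRange (i + 1) (nums.length : Int) 1)
      (G := pvStepA nums)]
  rfl

theorem pv_quadruplets_alt_eq_fold (nums : List Int) :
    quadruplets_alt nums = ((pvPairs nums).foldl (pvStepB nums)
      ((PySem.Dict.empty : PySem.Dict Int Int),
       (PySem.Dict.empty : PySem.Dict (Int × Int) Int), (0 : Int))).2.2 := by
  have h : quadruplets_alt nums
      = ((PySem.List.pyRange 0 (nums.length : Int) 1).foldl (fun st i =>
          (PySem.List.pyRange (i + 1) (nums.length : Int) 1).foldl
            (fun st j => pvStepB nums st (i, j)) st)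
          ((PySem.Dict.empty : PySem.Dict Int Int),
           (PySem.Dict.empty : PySem.Dict (Int × Int) Int), (0 : Int))).2.2 := rfl
  rw [h, pv_foldl_nested (f := fun i => PySem.List.pyRange (i + 1) (nums.length : Int) 1)
      (G := pvStepB nums)]
  rfl

-- core counting identity: among earlier pairs with the same product, the disjoint ones
-- are all minus those containing i minus those containing j (no double count: an earlier
-- pair (x, y) with x < y cannot contain both i and j unless it equals (i, j)).
theorem pv_count_diff (nums : List Int) (i j : Int) (hij : i < j) :
    ∀ (s : List (Int × Int)), (∀ q ∈ s, q.1 < q.2) → (i, j) ∉ s → ∀ (p : Int),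
    (((s.filter (fun q => pvProdAt nums q == p)).countP
        (fun q => decide (q.1 ≠ i ∧ q.1 ≠ j ∧ q.2 ≠ i ∧ q.2 ≠ j)) : Int))
      = ((s.countP (fun q => pvProdAt nums q == p) : Int))
        - ((s.countP (fun q => pvProdAt nums q == p && (q.1 == i || q.2 == i)) : Int))
        - ((s.countP (fun q => pvProdAt nums q == p && (q.1 == j || q.2 == j)) : Int)) := by
  intro s
  induction s with
  | nil => intro _ _ p; simp
  | cons a t ih =>
    intro hs hnot p
    have ha : a.1 < a.2 := hs a (List.mem_cons_self)
    have hna : ¬(a.1 = i ∧ a.2 = j) := by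
      intro ⟨u, v⟩
      have : a = (i, j) := Prod.ext u v
      exact hnot (by simp [this])
    have ih' := ih (fun q hq => hs q (List.mem_cons_of_mem _ hq))
      (fun h => hnot (List.mem_cons_of_mem _ h)) p
    by_cases hp : pvProdAt nums a = p
    · by_cases h1 : a.1 = i <;> by_cases h2 : a.1 = j <;>
        by_cases h3 : a.2 = i <;> by_cases h4 : a.2 = j <;>
        (simp [List.countP_cons, hp, h1, h2, h3, h4] at ih' ⊢ <;> omega)
    · simp [List.filter_cons, hp] at ih' ⊢ <;> omega

-- A's inner scan is a countP
theorem pv_inner_scan (l : List (Int × Int)) (i j : Int) (r : Int) :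
    l.foldl (fun r w =>
        if w.1 ≠ i ∧ w.1 ≠ j ∧ w.2 ≠ i ∧ w.2 ≠ j then r + 1 else r) r
      = r + (l.countP (fun w => decide (w.1 ≠ i ∧ w.1 ≠ j ∧ w.2 ≠ i ∧ w.2 ≠ j)) : Int) :=
  PySem.List.foldl_ite_add_one _ l r

-- main invariant induction over the pair sequence
theorem pv_main (nums : List Int) :
    ∀ (L seen : List (Int × Int)) (pm : PySem.Dict Int (List (Int × Int)))
      (pc : PySem.Dict Int Int) (ic : PySem.Dict (Int × Int) Int) (r : Int),
    (∀ q ∈ seen ++ L, q.1 < q.2) → (seen ++ L).Nodup →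
    (∀ p, pm.getD p [] = seen.filter (fun q => pvProdAt nums q == p)) →
    (∀ p, pc.getD p 0 = (seen.countP (fun q => pvProdAt nums q == p) : Int)) →
    (∀ p t, ic.getD (p, t) 0
        = (seen.countP (fun q => pvProdAt nums q == p && (q.1 == t || q.2 == t)) : Int)) →
    (L.foldl (pvStepA nums) (pm, r)).2 = (L.foldl (pvStepB nums) (pc, ic, r)).2.2 := by
  intro L
  induction L with
  | nil => intro seen pm pc ic r _ _ _ _ _; rfl
  | cons q t ih =>
    intro seen pm pc ic r hlt hnd hpm hpc hic
    obtain ⟨i, j⟩ := q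
    have hij : i < j := hlt (i, j) (by simp)
    have hnotin : (i, j) ∉ seen := by
      rcases (List.nodup_append.mp hnd) with ⟨_, _, hdisj⟩
      intro h; exact hdisj _ h _ List.mem_cons_self rfl
    have hseen_lt : ∀ q ∈ seen, q.1 < q.2 := fun q hq => hlt q (by simp [hq])
    -- the two increments agree
    have hinc : (pm.getD (pvProdAt nums (i, j)) []).foldl (fun r w =>
          if w.1 ≠ i ∧ w.1 ≠ j ∧ w.2 ≠ i ∧ w.2 ≠ j then r + 1 else r) r
        = r + pc.getD (pvProdAt nums (i, j)) 0
            - ic.getD (pvProdAt nums (i, j), i) 0 - ic.getD (pvProdAt nums (i, j), j) 0 := by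
      rw [pv_inner_scan, hpm (pvProdAt nums (i, j)), hpc (pvProdAt nums (i, j)),
        hic (pvProdAt nums (i, j)) i, hic (pvProdAt nums (i, j)) j,
        pv_count_diff nums i j hij seen hseen_lt hnotin (pvProdAt nums (i, j))]
      ring
    -- unfold one step on both sides
    simp only [List.foldl_cons]
    have hA : pvStepA nums (pm, r) (i, j)
        = (pm.insert (pvProdAt nums (i, j))
             (pm.getD (pvProdAt nums (i, j)) [] ++ [(i, j)]),
           (pm.getD (pvProdAt nums (i, j)) []).foldl (fun r w =>
             if w.1 ≠ i ∧ w.1 ≠ j ∧ w.2 ≠ i ∧ w.2 ≠ j then r + 1 else r) r) := rfl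
    have hB : pvStepB nums (pc, ic, r) (i, j)
        = (pc.insert (pvProdAt nums (i, j)) (pc.getD (pvProdAt nums (i, j)) 0 + 1),
           (ic.insert (pvProdAt nums (i, j), i)
               (ic.getD (pvProdAt nums (i, j), i) 0 + 1)).insert (pvProdAt nums (i, j), j)
             ((ic.insert (pvProdAt nums (i, j), i)
                 (ic.getD (pvProdAt nums (i, j), i) 0 + 1)).getD (pvProdAt nums (i, j), j) 0 + 1),
           r + pc.getD (pvProdAt nums (i, j)) 0
             - ic.getD (pvProdAt nums (i, j), i) 0 - ic.getD (pvProdAt nums (i, j), j) 0) := rfl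
    rw [hA, hB, hinc]
    have happ : (seen ++ [(i, j)]) ++ t = seen ++ (i, j) :: t := by simp
    have hij' : i ≠ j := by omega
    apply ih (seen ++ [(i, j)])
    · rw [happ]; exact hlt
    · rw [happ]; exact hnd
    · intro p'
      rw [PySem.Dict.getD_insert, List.filter_append]
      by_cases hpp : p' = pvProdAt nums (i, j)
      · subst hpp; simp [hpm]
      · have hne : ¬(pvProdAt nums (i, j) = p') := fun h => hpp h.symm
        simp [hpp, hpm, hne]
    · intro p'
      rw [PySem.Dict.getD_insert, List.countP_append]
      by_cases hpp : p' = pvProdAt nums (i, j)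
      · subst hpp; simp [hpc]
      · have hne : ¬(pvProdAt nums (i, j) = p') := fun h => hpp h.symm
        simp [hpp, hpc, hne]
    · intro p' t'
      simp only [PySem.Dict.getD_insert, List.countP_append]
      have hPZ : ¬(((pvProdAt nums (i, j) : Int), j) = ((pvProdAt nums (i, j) : Int), i)) := by
        simp [Prod.ext_iff]; omega
      by_cases hj2 : (p', t') = ((pvProdAt nums (i, j) : Int), j)
      · rw [if_pos hj2, if_neg hPZ]
        have h1 : p' = pvProdAt nums (i, j) := by simpa using congrArg Prod.fst hj2
        have h2 : t' = j := by simpa using congrArg Prod.snd hj2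
        subst h1; rw [h2]
        rw [hic]
        simp
      · rw [if_neg hj2]
        by_cases hi2 : (p', t') = ((pvProdAt nums (i, j) : Int), i)
        · rw [if_pos hi2]
          have h1 : p' = pvProdAt nums (i, j) := by simpa using congrArg Prod.fst hi2
          have h2 : t' = i := by simpa using congrArg Prod.snd hi2
          subst h1; rw [h2]
          rw [hic]
          simp
        · rw [if_neg hi2, hic]
          have hzero : ¬(pvProdAt nums (i, j) = p' ∧ (i = t' ∨ j = t')) := by
            rintro ⟨he, h | h⟩
            · exact hi2 (Prod.ext he.symm h.symm)
            · exact hj2 (Prod.ext he.symm h.symm)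
          have hz : (List.countP
              (fun q => pvProdAt nums q == p' && (q.1 == t' || q.2 == t')) [(i, j)]) = 0 := by
            simp only [List.countP_cons, List.countP_nil]
            split_ifs with h
            · exact absurd (by simpa using h) hzero
            · rfl
          rw [hz]
          simp

-- the pair list: every pair is increasing
theorem pv_pairs_lt (nums : List Int) : ∀ q ∈ pvPairs nums, q.1 < q.2 := by
  intro q hq
  simp only [pvPairs, List.mem_flatMap, List.mem_map] at hq
  obtain ⟨i, hi, j, hj, rfl⟩ := hq
  have := (PySem.List.mem_pyRange_one.mp hj).1
  omega

-- the pair list has no duplicates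
theorem pv_pairs_nodup (nums : List Int) : (pvPairs nums).Nodup := by
  unfold pvPairs
  apply List.nodup_flatMap.mpr
  constructor
  · intro i _
    exact List.Nodup.map (fun a b hab => by simpa using congrArg Prod.snd hab)
      (PySem.List.nodup_pyRange_one _ _)
  · apply List.Pairwise.imp ?_ (PySem.List.nodup_pyRange_one 0 (nums.length : Int))
    intro a b hab x hxa hxb
    simp only [List.mem_map] at hxa hxb
    obtain ⟨_, _, rfl⟩ := hxa
    obtain ⟨_, _, h⟩ := hxb
    exact hab (congrArg Prod.fst h).symm

-- ===== VERDICT (by name: the statement is the Claim_ definition above) =====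
theorem quadruplets_spec : Claim_equal_quadruplets := by
  intro nums _
  unfold Spec_quadruplets
  rw [pv_quadruplets_eq_fold, pv_quadruplets_alt_eq_fold]
  exact pv_main nums (pvPairs nums) [] _ _ _ 0
    (by simpa using pv_pairs_lt nums) (by simpa using pv_pairs_nodup nums)
    (by simp) (by simp) (by simp)
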